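-- pv_equiv track=rewrite | github.com/CactuseSecurity/firewall-orchestrator | scripts/customizing/app_data_import/get_owner_data3_from_normalized_csvs.py | normalize_option_value_args
-- ===== SOURCE A (Python) =====
-- def normalize_option_value_args(argv: list[str], option_names: tuple[str, ...]) -> list[str]:
--     normalized_argv: list[str] = []
--     option_names_set: set[str] = set(option_names)
--     index: int = 0
--     while index < len(argv):
--         current_arg: str = argv[index]
--         if current_arg in option_names_set and index + 1 < len(argv):
--             normalized_argv.append(f"{current_arg}={argv[index + 1]}")
--             index += 2
--             continue
--         normalized_argv.append(current_arg)
--         index += 1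
--     return normalized_argv
-- ===== SOURCE B (Python) =====
-- def normalize_option_value_args(argv: list[str], option_names: tuple[str, ...]) -> list[str]:
--     # Two staged passes: first classify every position ('head' = option that takes the
--     # next arg as its value, 'value' = consumed by the previous head, 'plain'), then
--     # render the output from the tags in a comprehension.
--     opts = frozenset(option_names)
--     n = len(argv)
--     tags: list[str] = []
--     pending = False
--     for i, a in enumerate(argv):
--         if pending:
--             tags.append('value')
--             pending = False
--         elif a in opts and i + 1 < n:
--             tags.append('head')
--             pending = True
--         else:
--             tags.append('plain')
--     return [argv[i] + "=" + argv[i + 1] if t == 'head' else argv[i]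
--             for i, t in enumerate(tags) if t != 'value']
-- ===== Notes on version B (the rewrite author's own statement) =====
-- stated objective: alternative
-- what changed: Replaced A's single index-jumping while loop with two staged passes: a classification pass that tags each position as head/value/plain, and a separate rendering pass that builds the output from the tags.
import Mathlib
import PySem

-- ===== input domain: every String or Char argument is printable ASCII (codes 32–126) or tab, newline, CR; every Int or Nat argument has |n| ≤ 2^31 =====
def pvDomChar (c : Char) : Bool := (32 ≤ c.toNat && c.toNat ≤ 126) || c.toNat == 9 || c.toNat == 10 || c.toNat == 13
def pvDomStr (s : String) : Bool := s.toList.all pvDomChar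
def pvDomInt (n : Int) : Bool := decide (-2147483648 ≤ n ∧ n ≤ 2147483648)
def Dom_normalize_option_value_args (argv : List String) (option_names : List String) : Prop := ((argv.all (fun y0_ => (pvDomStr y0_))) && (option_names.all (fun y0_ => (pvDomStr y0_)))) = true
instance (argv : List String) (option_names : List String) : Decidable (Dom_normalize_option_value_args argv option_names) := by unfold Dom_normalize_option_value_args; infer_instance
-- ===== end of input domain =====

-- B replaces A's index-jumping while loop with two staged passes (classify each position as head/value/plain, then render from the tags); objective: alternative decomposition, same cost.


-- ===== PORT A =====
-- index-based while loop of A, step for step: stride 2 on a matched option, else stride 1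
def pvGoA (argv : List String) (s : PySem.Set String) (index : Nat) : List String :=
  if h : index < argv.length then
    let current_arg := argv[index]
    if PySem.Set.contains s current_arg && decide (index + 1 < argv.length) then
      (current_arg ++ "=" ++ argv.getD (index + 1) "") :: pvGoA argv s (index + 2)
    else
      current_arg :: pvGoA argv s (index + 1)
  else []
termination_by argv.length - index

def normalize_option_value_args (argv : List String) (option_names : List String) : List String :=
  pvGoA argv (PySem.Set.ofList option_names) 0

-- ===== PORT B =====
-- B stage 1: the classification loop (enumerate with a 'pending' flag), tagging each position
def pvTags (opts : PySem.Set String) (n : Nat) : Nat → Bool → List String → List String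
  | _, _, [] => []
  | i, pending, a :: rest =>
    if pending then "value" :: pvTags opts n (i + 1) false rest
    else if PySem.Set.contains opts a && decide (i + 1 < n) then
      "head" :: pvTags opts n (i + 1) true rest
    else "plain" :: pvTags opts n (i + 1) false rest

-- B stage 2: the rendering comprehension over enumerate(tags) — filter out 'value', join on 'head'
def pvRender (argv : List String) : Nat → List String → List String
  | _, [] => []
  | i, t :: ts =>
    if t == "value" then pvRender argv (i + 1) ts
    else (if t == "head" then argv.getD i "" ++ "=" ++ argv.getD (i + 1) ""
          else argv.getD i "") :: pvRender argv (i + 1) ts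

def normalize_option_value_args_alt (argv : List String) (option_names : List String) : List String :=
  pvRender argv 0 (pvTags (PySem.Set.ofList option_names) argv.length 0 false argv)

-- ===== PRECONDITION & SPEC =====
def Spec_normalize_option_value_args (argv : List String) (option_names : List String) (out : List String) : Prop := out = normalize_option_value_args_alt argv option_names
instance (argv : List String) (option_names : List String) (out : List String) : Decidable (Spec_normalize_option_value_args argv option_names out) := by unfold Spec_normalize_option_value_args; infer_instance

-- ===== CLAIM (what is proved, stated in full; the proofs are below) =====
def Claim_equal_normalize_option_value_args : Prop := ∀ (argv : List String) (option_names : List String), Dom_normalize_option_value_args argv option_names → Spec_normalize_option_value_args argv option_names (normalize_option_value_args argv option_names)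

-- ===== LEMMAS AND PROOFS =====
-- proof-only intermediate form: the fused single pass both programs are equivalent to
def pvGoB (s : PySem.Set String) : List String → List String
  | [] => []
  | a :: rest =>
    if PySem.Set.contains s a then
      match rest with
      | [] => [a]
      | v :: rs => (a ++ "=" ++ v) :: pvGoB s rs
    else a :: pvGoB s rest

theorem pvGoA_eq_goB_drop (argv : List String) (s : PySem.Set String) :
    ∀ n i, argv.length - i ≤ n → pvGoA argv s i = pvGoB s (argv.drop i) := by
  intro n
  induction n with
  | zero =>
    intro i h
    have hle : argv.length ≤ i := by omega
    rw [pvGoA]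
    simp [Nat.not_lt.mpr hle, List.drop_eq_nil_of_le hle, pvGoB]
  | succ n ih =>
    intro i h
    rw [pvGoA]
    by_cases hi : i < argv.length
    · have hd : argv.drop i = argv[i] :: argv.drop (i + 1) := List.drop_eq_getElem_cons hi
      by_cases hc : PySem.Set.contains s argv[i] = true
      · by_cases hb : i + 1 < argv.length
        · have hd2 : argv.drop (i + 1) = argv[i + 1] :: argv.drop (i + 2) :=
            List.drop_eq_getElem_cons hb
          have hg : argv.getD (i + 1) "" = argv[i + 1] := List.getD_eq_getElem _ _ hb
          simp only [hi, dif_pos, hc, hb, decide_true, Bool.and_self, if_pos, hd, hd2, pvGoB, hg]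
          exact congrArg _ (ih (i + 2) (by omega))
        · have hle : argv.length ≤ i + 1 := by omega
          have hd2 : argv.drop (i + 1) = [] := List.drop_eq_nil_of_le hle
          simp only [hi, dif_pos, hb, decide_false, Bool.and_false,
            if_neg, Bool.false_eq_true, not_false_iff, hd, hd2, pvGoB, hc, if_true]
          rw [ih (i + 1) (by omega), hd2, pvGoB]
      · rw [hd, pvGoB.eq_def]
        simp only [hi, dif_pos, Bool.not_eq_true] at *
        simp only [hc, Bool.false_and, Bool.false_eq_true, if_neg, not_false_iff]
        rw [ih (i + 1) (by omega)]
    · have hle : argv.length ≤ i := by omega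
      simp [hi, List.drop_eq_nil_of_le hle, pvGoB]

theorem pvRender_tags_eq_goB (argv : List String) (s : PySem.Set String) :
    ∀ n l i, l.length ≤ n → argv.drop i = l →
      pvRender argv i (pvTags s argv.length i false l) = pvGoB s l := by
  intro n
  induction n with
  | zero =>
    intro l i hn hd
    have hnil : l = [] := List.eq_nil_of_length_eq_zero (by omega)
    subst hnil
    simp [pvTags, pvRender, pvGoB]
  | succ n ih =>
    intro l i hn hd
    match l with
    | [] => simp [pvTags, pvRender, pvGoB]
    | a :: rest =>
      have hi : i < argv.length := by
        by_contra h
        rw [List.drop_eq_nil_of_le (Nat.le_of_not_lt h)] at hd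
        exact (List.cons_ne_nil a rest) hd.symm
      have hl : argv.length = i + rest.length + 1 := by
        have hlen := congrArg List.length hd
        rw [List.length_drop, List.length_cons] at hlen
        omega
      have hga : argv[i]? = some a := by
        have h0x : (argv.drop i)[0]? = some a := by rw [hd]; rfl
        simpa using h0x
      by_cases hc : a ∈ s
      · by_cases hb : i + 1 < argv.length
        · have hr : rest ≠ [] := by
            intro h; rw [h] at hl; simp at hl; omega
          match rest, hr with
          | v :: rs, _ =>
            have hgv : argv[i + 1]? = some v := by
              have h1x : (argv.drop i)[1]? = some v := by rw [hd]; rfl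
              simpa using h1x
            have hd2 : argv.drop (i + 1 + 1) = rs := by
              have h2 : (argv.drop i).drop 2 = argv.drop (i + 2) := List.drop_drop
              rw [hd] at h2
              have : argv.drop (i + 2) = rs := by simpa using h2.symm
              simpa [Nat.add_assoc] using this
            have hns : rs.length ≤ n := by simp at hn; omega
            have hrec := ih rs (i + 1 + 1) hns hd2
            simp [pvTags, pvRender, pvGoB, List.getD, hc, hb, hga, hgv, hrec]
            exact Option.some.inj ((List.getElem?_eq_getElem hb).symm.trans hgv)
        · have hrnil : rest = [] := by
            by_contra h
            have := List.length_pos_of_ne_nil h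
            omega
          subst hrnil
          simp [pvTags, pvRender, pvGoB, List.getD, hc, hb, hga]
      · have hd2 : argv.drop (i + 1) = rest := by
          have h2 : (argv.drop i).drop 1 = argv.drop (i + 1) := List.drop_drop
          rw [hd] at h2
          simpa using h2.symm
        have hns : rest.length ≤ n := by simp at hn; omega
        have hrec := ih rest (i + 1) hns hd2
        have hstep : pvGoB s (a :: rest) = a :: pvGoB s rest := by
          rw [pvGoB.eq_def]
          simp [hc]
        simp [pvTags, pvRender, List.getD, hc, hga, hrec, hstep]

-- ===== VERDICT (by name: the statement is the Claim_ definition above) =====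
theorem normalize_option_value_args_spec : Claim_equal_normalize_option_value_args := by
  intro argv option_names _
  unfold Spec_normalize_option_value_args normalize_option_value_args normalize_option_value_args_alt
  rw [pvGoA_eq_goB_drop argv _ argv.length 0 (by omega)]
  rw [pvRender_tags_eq_goB argv _ argv.length argv 0 (by omega) (by simp)]
  simp
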